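-- pv_equiv track=rewrite | github.com/Arkaeriit/vim-hex | hex_eddit.py | show_byte_array
-- ===== SOURCE A (Python) =====
-- def show_byte_array(content):
--     "From a bytearray, return a string that shows its content."
--     ret = ""
--     for byte in content:
--         if byte == 0:
--             ret += "␀"
--         elif byte <= 0x6:
--             ret += "○"
--         elif byte == 0x7:
--             ret += "⍾" # Not great
--         elif byte == 0x8:
--             ret += "⇤"
--         elif byte == 0x9:
--             ret += "⇥"
--         elif byte == 0xA:
--             ret += "↵"
--         elif byte <= 0xC:
--             ret += "○"
--         elif byte == 0xD:
--             ret += "↵"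
--         elif byte <= 0x1F:
--             ret += "○"
--         elif byte <= 0x7E:
--             ret += chr(byte)
--         else:
--             ret += "·"
--     return ret
-- ===== SOURCE B (Python) =====
-- # Binary search over segment boundaries instead of a linear elif chain: the int
-- # line is cut into 12 contiguous segments; each byte's segment is found by a
-- # recursive bisection of the boundary list and mapped to that segment's glyph.
-- _BOUNDS = [0, 1, 7, 8, 9, 10, 11, 13, 14, 32, 127]
-- _GLYPHS = ["\u25cb", "\u2400", "\u25cb", "\u237e", "\u21e4", "\u21e5",
--            "\u21b5", "\u25cb", "\u21b5", "\u25cb", None, "\u00b7"]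
--
-- def _seg(b, bounds):
--     "Number of boundaries <= b, by bisection."
--     if not bounds:
--         return 0
--     mid = len(bounds) // 2
--     if bounds[mid] <= b:
--         return mid + 1 + _seg(b, bounds[mid + 1:])
--     return _seg(b, bounds[:mid])
--
-- def _glyph(byte):
--     g = _GLYPHS[_seg(byte, _BOUNDS)]
--     return chr(byte) if g is None else g
--
-- def show_byte_array(content):
--     "From a bytearray, return a string that shows its content."
--     return "".join([_glyph(byte) for byte in content])
-- ===== Notes on version B (the rewrite author's own statement) =====
-- stated objective: alternative
-- what changed: Replaced the per-byte 11-branch if/elif decision tree with a recursive binary search over a list of 11 segment boundaries that selects each byte's glyph from a parallel segment-glyph table, collecting pieces in a list joined at the end.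
import Mathlib
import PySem

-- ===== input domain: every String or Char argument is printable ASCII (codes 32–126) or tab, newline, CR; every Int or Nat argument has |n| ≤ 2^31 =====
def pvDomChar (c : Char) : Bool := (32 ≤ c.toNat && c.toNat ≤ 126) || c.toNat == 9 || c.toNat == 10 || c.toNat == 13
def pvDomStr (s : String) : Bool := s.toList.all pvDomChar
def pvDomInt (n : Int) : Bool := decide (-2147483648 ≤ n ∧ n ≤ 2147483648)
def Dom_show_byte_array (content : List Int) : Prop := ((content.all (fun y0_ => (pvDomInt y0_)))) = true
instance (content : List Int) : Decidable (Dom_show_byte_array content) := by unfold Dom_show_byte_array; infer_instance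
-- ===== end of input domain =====

-- B replaces A's per-byte 11-branch if/elif decision tree by a recursive binary search
-- over a list of segment boundaries selecting the glyph from a parallel segment table
-- (objective: alternative).

-- ===== PORT A =====
-- the body of A's for-loop, branch for branch
def pvStepA (ret : String) (byte : Int) : String :=
  if byte = 0 then ret ++ "␀"
  else if byte ≤ 0x6 then ret ++ "○"
  else if byte = 0x7 then ret ++ "⍾"
  else if byte = 0x8 then ret ++ "⇤"
  else if byte = 0x9 then ret ++ "⇥"
  else if byte = 0xA then ret ++ "↵"
  else if byte ≤ 0xC then ret ++ "○"
  else if byte = 0xD then ret ++ "↵"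
  else if byte ≤ 0x1F then ret ++ "○"
  else if byte ≤ 0x7E then ret ++ String.ofList [Char.ofNat byte.toNat]  -- chr(byte); exact: reached only for 0x20..0x7E
  else ret ++ "·"

def show_byte_array (content : List Int) : String :=
  content.foldl pvStepA ""

-- ===== PORT B =====
def pvBounds : List Int := [0, 1, 7, 8, 9, 10, 11, 13, 14, 32, 127]
-- none marks the printable segment (rendered with chr)
def pvGlyphs : List (Option String) :=
  [some "○", some "␀", some "○", some "⍾", some "⇤", some "⇥",
   some "↵", some "○", some "↵", some "○", none, some "·"]

-- _seg: number of boundaries ≤ b, by bisection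
def pvSeg (b : Int) (bounds : List Int) : Nat :=
  if bounds.isEmpty then 0
  else
    let mid := bounds.length / 2
    -- bounds[mid] with 0 ≤ mid < len: List.getD is exact here; bounds[mid+1:] / bounds[:mid] = drop/take (exact for in-range nonneg slice indices)
    if bounds.getD mid 0 ≤ b then
      mid + 1 + pvSeg b (bounds.drop (mid + 1))
    else
      pvSeg b (bounds.take mid)
termination_by bounds.length
decreasing_by
  all_goals
    cases bounds with
    | nil => simp_all
    | cons h t => simp [List.length_take]; try omega

def pvGlyphB (byte : Int) : String :=
  -- _GLYPHS[seg]: seg ≤ 11 < 12 always, List.getD exact here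
  match pvGlyphs.getD (pvSeg byte pvBounds) none with
  | some g => g
  | none => String.ofList [Char.ofNat byte.toNat]  -- chr(byte); exact: reached only for 0x20..0x7E

def show_byte_array_alt (content : List Int) : String :=
  PySem.Str.join "" (content.map pvGlyphB)

-- ===== PRECONDITION & SPEC =====
def Spec_show_byte_array (content : List Int) (out : String) : Prop := out = show_byte_array_alt content
instance (content : List Int) (out : String) : Decidable (Spec_show_byte_array content out) := by unfold Spec_show_byte_array; infer_instance

-- ===== CLAIM =====
def Claim_equal_show_byte_array : Prop := ∀ (content : List Int), Dom_show_byte_array content → Spec_show_byte_array content (show_byte_array content)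

-- ===== LEMMAS AND PROOFS =====
-- A's per-byte glyph, the if/elif chain as a function (proof helper only)
def pvGlyphA (byte : Int) : String :=
  if byte = 0 then "␀"
  else if byte ≤ 0x6 then "○"
  else if byte = 0x7 then "⍾"
  else if byte = 0x8 then "⇤"
  else if byte = 0x9 then "⇥"
  else if byte = 0xA then "↵"
  else if byte ≤ 0xC then "○"
  else if byte = 0xD then "↵"
  else if byte ≤ 0x1F then "○"
  else if byte ≤ 0x7E then String.ofList [Char.ofNat byte.toNat]
  else "·"

set_option maxHeartbeats 1000000 in
theorem pvStepA_eq (acc : String) (b : Int) : pvStepA acc b = acc ++ pvGlyphA b := by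
  rw [pvStepA, pvGlyphA]; split_ifs <;> rfl

theorem pvSeg_eval (b : Int) : pvSeg b pvBounds =
    (if 10 ≤ b then 6 + (if 14 ≤ b then 3 + (if 127 ≤ b then 2 else if 32 ≤ b then 1 else 0)
        else if 13 ≤ b then 2 else if 11 ≤ b then 1 else 0)
     else if 7 ≤ b then 3 + (if 9 ≤ b then 2 else if 8 ≤ b then 1 else 0)
        else if 1 ≤ b then 2 else if 0 ≤ b then 1 else 0) := by
  simp [pvSeg, pvBounds]
set_option maxHeartbeats 1000000 in
theorem pvGlyph_eq (b : Int) : pvGlyphB b = pvGlyphA b := by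
  by_cases h1 : b = 0
  · have hs : pvSeg b pvBounds = 1 := by rw [pvSeg_eval]; split_ifs <;> omega
    rw [pvGlyphB, hs]; simp [pvGlyphs, pvGlyphA, h1]
  by_cases h2 : b ≤ 0x6
  · have hs : pvSeg b pvBounds = (if 1 ≤ b then 2 else 0) := by rw [pvSeg_eval]; split_ifs <;> omega
    by_cases h1' : 1 ≤ b <;> (rw [pvGlyphB, hs]; simp [pvGlyphs, pvGlyphA, h1, h2, h1'])
  by_cases h3 : b = 0x7
  · have hs : pvSeg b pvBounds = 3 := by rw [pvSeg_eval]; split_ifs <;> omega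
    rw [pvGlyphB, hs]; simp [pvGlyphs, pvGlyphA, h1, h2, h3]
  by_cases h4 : b = 0x8
  · have hs : pvSeg b pvBounds = 4 := by rw [pvSeg_eval]; split_ifs <;> omega
    rw [pvGlyphB, hs]; simp [pvGlyphs, pvGlyphA, h1, h2, h3, h4]
  by_cases h5 : b = 0x9
  · have hs : pvSeg b pvBounds = 5 := by rw [pvSeg_eval]; split_ifs <;> omega
    rw [pvGlyphB, hs]; simp [pvGlyphs, pvGlyphA, h1, h2, h3, h4, h5]
  by_cases h6 : b = 0xA
  · have hs : pvSeg b pvBounds = 6 := by rw [pvSeg_eval]; split_ifs <;> omega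
    rw [pvGlyphB, hs]; simp [pvGlyphs, pvGlyphA, h1, h2, h3, h4, h5, h6]
  by_cases h7 : b ≤ 0xC
  · have hs : pvSeg b pvBounds = 7 := by rw [pvSeg_eval]; split_ifs <;> omega
    rw [pvGlyphB, hs]; simp [pvGlyphs, pvGlyphA, h1, h2, h3, h4, h5, h6, h7]
  by_cases h8 : b = 0xD
  · have hs : pvSeg b pvBounds = 8 := by rw [pvSeg_eval]; split_ifs <;> omega
    rw [pvGlyphB, hs]; simp [pvGlyphs, pvGlyphA, h1, h2, h3, h4, h5, h6, h7, h8]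
  by_cases h9 : b ≤ 0x1F
  · have hs : pvSeg b pvBounds = 9 := by rw [pvSeg_eval]; split_ifs <;> omega
    rw [pvGlyphB, hs]; simp [pvGlyphs, pvGlyphA, h1, h2, h3, h4, h5, h6, h7, h8, h9]
  by_cases h10 : b ≤ 0x7E
  · have hs : pvSeg b pvBounds = 10 := by rw [pvSeg_eval]; split_ifs <;> omega
    rw [pvGlyphB, hs]; simp [pvGlyphs, pvGlyphA, h1, h2, h3, h4, h5, h6, h7, h8, h9, h10]
  · have hs : pvSeg b pvBounds = 11 := by rw [pvSeg_eval]; split_ifs <;> omega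
    rw [pvGlyphB, hs]; simp [pvGlyphs, pvGlyphA, h1, h2, h3, h4, h5, h6, h7, h8, h9, h10]

theorem pvJoin_empty_cons (cs : List Char) (l : List (List Char)) :
    PySem.Chars.join [] (cs :: l) = cs ++ PySem.Chars.join [] l := by
  induction l generalizing cs with
  | nil => simp [PySem.Chars.join, List.intercalate]
  | cons h t ih => simp_all [PySem.Chars.join, List.intercalate, List.intersperse]

theorem pvAlt_cons (b : Int) (l : List Int) :
    show_byte_array_alt (b :: l) = pvGlyphB b ++ show_byte_array_alt l := by
  apply String.toList_inj.mp
  simp only [show_byte_array_alt, PySem.Str.join, String.toList_empty, List.map_cons,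
    String.toList_ofList, String.toList_append]
  rw [pvJoin_empty_cons]

theorem pvFoldl_eq_alt (l : List Int) (acc : String) :
    l.foldl pvStepA acc = acc ++ show_byte_array_alt l := by
  induction l generalizing acc with
  | nil =>
    apply String.toList_inj.mp
    simp [show_byte_array_alt, PySem.Str.join, PySem.Chars.join, List.intercalate]
  | cons b t ih =>
    simp only [List.foldl_cons, pvStepA_eq, pvAlt_cons, pvGlyph_eq, ih, String.append_assoc]

-- ===== VERDICT =====
theorem show_byte_array_spec : Claim_equal_show_byte_array := by
  intro content _
  show show_byte_array content = show_byte_array_alt content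
  rw [show_byte_array, pvFoldl_eq_alt]
  apply String.toList_inj.mp
  simp
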